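-- pv_equiv track=rewrite | github.com/veerat-beri/dsalgo | backtracking/utils/n_unique_caps.py | get_total_arrangements
-- ===== SOURCE A (Python) =====
-- from typing import List
--
-- def get_total_arrangements(caps_collections: List[List[int]]):
--     total_cap_collections = len(caps_collections)
--
--     def _process_possible_arrangements(selected_caps_set, collection_index, possible_arrangements_count):
--         if collection_index >= total_cap_collections:
--             return possible_arrangements_count + 1
--
--         caps_collection = caps_collections[collection_index]
--         for cap in caps_collection:
--             if cap in selected_caps_set:
--                 continue
--             selected_caps_set.add(cap)
--             possible_arrangements_count = _process_possible_arrangements(selected_caps_set, collection_index + 1, possible_arrangements_count)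
--             selected_caps_set.remove(cap)
--         return possible_arrangements_count
--
--     return _process_possible_arrangements(set(), 0, 0)
-- ===== SOURCE B (Python) =====
-- def get_total_arrangements(caps_collections):
--     # Iterative frontier DP over collections: a state is the set of used caps that can
--     # still matter (caps occurring in later collections); branches agreeing there merge.
--     suffixes = []
--     fut = set()
--     for coll in reversed(caps_collections):
--         suffixes.append(fut)
--         fut = fut | set(coll)
--     suffixes.reverse()
--     states = {(): 1}
--     for coll, fut in zip(caps_collections, suffixes):
--         nxt = {}
--         for used, cnt in states.items():
--             used_set = set(used)
--             for cap in coll: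
--                 if cap in used_set:
--                     continue
--                 key = tuple(sorted((used_set | {cap}) & fut))
--                 nxt[key] = nxt.get(key, 0) + cnt
--         states = nxt
--     return sum(states.values())
-- ===== Notes on version B (the rewrite author's own statement) =====
-- stated objective: faster
-- what changed: Replaces the DFS backtracking (one recursive branch per partial assignment) by an iterative frontier DP over collections whose state is the set of used caps restricted to caps still occurring in later collections (dict keyed by its sorted tuple), merging all branches that agree on that projection.
import Mathlib
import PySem

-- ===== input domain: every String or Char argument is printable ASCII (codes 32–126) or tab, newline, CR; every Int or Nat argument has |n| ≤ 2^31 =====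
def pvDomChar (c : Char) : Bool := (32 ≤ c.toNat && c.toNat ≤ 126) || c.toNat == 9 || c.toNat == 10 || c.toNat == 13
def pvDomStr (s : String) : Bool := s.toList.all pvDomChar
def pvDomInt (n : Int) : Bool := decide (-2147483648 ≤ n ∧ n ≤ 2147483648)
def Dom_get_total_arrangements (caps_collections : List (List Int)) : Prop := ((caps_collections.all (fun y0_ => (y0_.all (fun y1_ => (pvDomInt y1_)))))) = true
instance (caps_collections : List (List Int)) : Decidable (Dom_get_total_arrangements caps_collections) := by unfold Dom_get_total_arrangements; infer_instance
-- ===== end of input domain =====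

-- B replaces A's DFS backtracking by an iterative DP over collections with branch merging
-- (dict keyed by the sorted list of used caps); return values proved equal on all inputs.

-- ===== PORT A =====
-- literal port of the nested recursion `_process_possible_arrangements`:
-- `selected_caps_set.add/remove` around the recursive call is modelled by passing the
-- extended set to the recursive call only (the set is restored afterwards in Python).
def pvA_go (caps_collections : List (List Int)) (total : Nat)
    (selected : PySem.Set Int) (collection_index : Nat) (acc : Int) : Int :=
  if h : collection_index ≥ total then acc + 1
  else
    -- caps_collections[collection_index]; in-range (collection_index < total = len), so exact
    let caps_collection := PySem.List.pyGetD caps_collections (Int.ofNat collection_index) []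
    caps_collection.foldl
      (fun a cap =>
        if PySem.Set.contains selected cap then a
        else pvA_go caps_collections total (PySem.Set.add selected cap) (collection_index + 1) a)
      acc
termination_by total - collection_index
decreasing_by omega

def get_total_arrangements (caps_collections : List (List Int)) : Int :=
  pvA_go caps_collections caps_collections.length PySem.Set.empty 0 0

-- ===== PORT B =====
-- Source B's first loop: `suffixes[i]` = set of caps occurring in collections AFTER index i
-- (built by one pass over the reversed list, then reversed, exactly as in Source B)
def pvB_sfxAux (caps_collections : List (List Int)) :
    List (PySem.Set Int) × PySem.Set Int :=
  caps_collections.reverse.foldl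
    (fun acc coll => (acc.1 ++ [acc.2], PySem.Set.union acc.2 (PySem.Set.ofList coll)))
    ([], PySem.Set.empty)

def pvB_suffixes (caps_collections : List (List Int)) : List (PySem.Set Int) :=
  (pvB_sfxAux caps_collections).1.reverse

-- inner loop of Source B: expand one state (used, count) over one collection into `nxt`;
-- `sorted` of the intersection set is order-independent, so the port is exact
def pvB_step (collection : List Int) (fut : PySem.Set Int)
    (nx : PySem.Dict (List Int) Int) (used : List Int) (count : Int) :
    PySem.Dict (List Int) Int :=
  collection.foldl
    (fun nx cap =>
      if PySem.Set.contains (PySem.Set.ofList used) cap then nx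
      else
        let key := PySem.List.sorted
          (PySem.Set.inter (PySem.Set.union (PySem.Set.ofList used) [cap]) fut)
          (fun x => x) false
        nx.insert key (nx.getD key 0 + count))
    nx

def get_total_arrangements_alt (caps_collections : List (List Int)) : Int :=
  let suffixes := pvB_suffixes caps_collections
  let final := (caps_collections.zip suffixes).foldl
    (fun states pair =>
      states.items.foldl (fun nx p => pvB_step pair.1 pair.2 nx p.1 p.2) PySem.Dict.empty)
    (PySem.Dict.empty.insert [] 1)
  final.values.sum

-- ===== PRECONDITION & SPEC =====
def Spec_get_total_arrangements (caps_collections : List (List Int)) (out : Int) : Prop := out = get_total_arrangements_alt caps_collections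
instance (caps_collections : List (List Int)) (out : Int) : Decidable (Spec_get_total_arrangements caps_collections out) := by unfold Spec_get_total_arrangements; infer_instance

-- ===== CLAIM (what is proved, stated in full; the proofs are below) =====
def Claim_equal_get_total_arrangements : Prop := ∀ (caps_collections : List (List Int)), Dom_get_total_arrangements caps_collections → Spec_get_total_arrangements caps_collections (get_total_arrangements caps_collections)

-- ===== LEMMAS AND PROOFS =====

-- weighted sum of a state list: each count times A's continuation value from that cap set
def pvWS (caps : List (List Int)) (n : Nat) (i : Nat) (l : List (List Int × Int)) : Int :=
  (l.map (fun p => p.2 * pvA_go caps n (PySem.Set.ofList p.1) i 0)).sum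

theorem pvA_go_acc (caps : List (List Int)) (n : Nat) :
    ∀ k i S acc, n - i ≤ k → pvA_go caps n S i acc = acc + pvA_go caps n S i 0 := by
  intro k
  induction k with
  | zero =>
    intro i S acc hk
    have h : i ≥ n := by omega
    rw [pvA_go, pvA_go]
    simp [h]
  | succ k ih =>
    intro i S acc hk
    by_cases h : i ≥ n
    · rw [pvA_go, pvA_go]; simp [h]
    · rw [pvA_go, pvA_go]
      simp only [dif_neg h]
      have sub : ∀ (l : List Int) (a b : Int),
          l.foldl (fun a cap => if PySem.Set.contains S cap then a
            else pvA_go caps n (PySem.Set.add S cap) (i + 1) a) (a + b)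
          = a + l.foldl (fun a cap => if PySem.Set.contains S cap then a
            else pvA_go caps n (PySem.Set.add S cap) (i + 1) a) b := by
        intro l
        induction l with
        | nil => intro a b; simp
        | cons cap l ihl =>
          intro a b
          simp only [List.foldl_cons]
          by_cases hc : PySem.Set.contains S cap
          · simp only [if_pos hc]; exact ihl a b
          · simp only [if_neg hc]
            rw [ih (i+1) (PySem.Set.add S cap) (a + b) (by omega),
                ih (i+1) (PySem.Set.add S cap) b (by omega), add_assoc]
            exact ihl a _
      have := sub (PySem.List.pyGetD caps (Int.ofNat i) []) acc 0
      simpa using this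

theorem pvFoldA_acc (caps : List (List Int)) (n : Nat) (i : Nat) (S : PySem.Set Int)
    (l : List Int) (a : Int) :
    l.foldl (fun a cap => if PySem.Set.contains S cap then a
        else pvA_go caps n (PySem.Set.add S cap) (i + 1) a) a
    = a + l.foldl (fun a cap => if PySem.Set.contains S cap then a
        else pvA_go caps n (PySem.Set.add S cap) (i + 1) a) 0 := by
  induction l generalizing a with
  | nil => simp
  | cons cap l ihl =>
    simp only [List.foldl_cons]
    by_cases hc : PySem.Set.contains S cap
    · simp only [if_pos hc]; exact ihl a
    · simp only [if_neg hc]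
      rw [pvA_go_acc caps n n (i+1) _ a (by omega),
          pvA_go_acc caps n n (i+1) _ (0:Int) (by omega)]
      rw [ihl, ihl (0 + pvA_go caps n (PySem.Set.add S cap) (i + 1) 0)]
      ring

-- A's continuation from person i only looks at membership of caps that occur in
-- collections i, i+1, …: two selected-sets agreeing there give the same value
theorem pvA_go_congr (caps : List (List Int)) (n : Nat) (hn : n = caps.length) :
    ∀ k i S₁ S₂ acc, n - i ≤ k →
      (∀ x : Int, x ∈ ((caps.drop i).flatten) → (x ∈ S₁ ↔ x ∈ S₂)) →
      pvA_go caps n S₁ i acc = pvA_go caps n S₂ i acc := by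
  intro k
  induction k with
  | zero =>
    intro i S₁ S₂ acc hk hm
    have h : i ≥ n := by omega
    rw [pvA_go, pvA_go]; simp [h]
  | succ k ih =>
    intro i S₁ S₂ acc hk hm
    by_cases h : i ≥ n
    · rw [pvA_go, pvA_go]; simp [h]
    · rw [pvA_go, pvA_go]
      simp only [dif_neg h]
      have hilt : i < caps.length := by omega
      have hdropc : caps.drop i = caps[i] :: caps.drop (i+1) :=
        List.drop_eq_getElem_cons hilt
      have hgetD : PySem.List.pyGetD caps (Int.ofNat i) [] = caps[i] := by
        rw [Int.ofNat_eq_natCast, PySem.List.pyGetD_natCast,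
            List.getD_eq_getElem?_getD, List.getElem?_eq_getElem hilt]
        rfl
      have sub : ∀ (l : List Int), (∀ c ∈ l, c ∈ caps[i]) → ∀ (a : Int),
          l.foldl (fun a cap => if PySem.Set.contains S₁ cap then a
            else pvA_go caps n (PySem.Set.add S₁ cap) (i + 1) a) a
          = l.foldl (fun a cap => if PySem.Set.contains S₂ cap then a
            else pvA_go caps n (PySem.Set.add S₂ cap) (i + 1) a) a := by
        intro l
        induction l with
        | nil => intro _ a; simp
        | cons cap l ihl =>
          intro hl a
          have hcapfl : (cap : Int) ∈ (caps.drop i).flatten := by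
            rw [hdropc]
            simp only [List.flatten_cons, List.mem_append]
            exact Or.inl (hl cap (by simp))
          have hiff := hm cap hcapfl
          have hcc : PySem.Set.contains S₁ cap = PySem.Set.contains S₂ cap := by
            by_cases hx : cap ∈ S₂
            · simp [hx, hiff.mpr hx]
            · have hx1 : cap ∉ S₁ := fun hy => hx (hiff.mp hy)
              simp [hx, hx1]
          simp only [List.foldl_cons, hcc]
          by_cases hc : PySem.Set.contains S₂ cap
          · simp only [if_pos hc]
            exact ihl (fun c hc' => hl c (List.mem_cons_of_mem _ hc')) a
          · simp only [if_neg hc]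
            rw [ih (i+1) (PySem.Set.add S₁ cap) (PySem.Set.add S₂ cap) a (by omega)
                (by intro x hx
                    have hx0 : x ∈ (caps.drop i).flatten := by
                      rw [hdropc]
                      simp only [List.flatten_cons, List.mem_append]
                      exact Or.inr hx
                    simp [PySem.Set.mem_add, hm x hx0])]
            exact ihl (fun c hc' => hl c (List.mem_cons_of_mem _ hc')) _
      exact sub _ (by rw [hgetD]; exact fun c hc => hc) acc

theorem pvReplaceSum (f : List Int → Int) :
    ∀ (l : List (List Int × Int)) (k : List Int) (c v : Int),
      (l.map Prod.fst).Nodup → (k, c) ∈ l →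
      ((l.map (fun p => if p.1 == k then (k, c + v) else p)).map (fun p => p.2 * f p.1)).sum
        = (l.map (fun p => p.2 * f p.1)).sum + v * f k := by
  intro l
  induction l with
  | nil => intro k c v _ hmem; simp at hmem
  | cons p t ih =>
    intro k c v hnd hmem
    simp only [List.map_cons, List.nodup_cons] at hnd ⊢
    rcases List.mem_cons.mp hmem with hp | ht
    · subst hp
      simp only [beq_self_eq_true, if_pos]
      have hid : t.map (fun p => if p.1 == k then (k, c + v) else p) = t := by
        conv_rhs => rw [← List.map_id t]
        apply List.map_congr_left
        intro q hq
        have hq1 : q.1 ∈ t.map Prod.fst := List.mem_map_of_mem (f := Prod.fst) hq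
        have : q.1 ≠ k := fun he => hnd.1 (he ▸ hq1)
        simp [this]
      rw [hid]
      simp only [List.sum_cons]
      ring
    · have hk : k ∈ t.map Prod.fst := List.mem_map_of_mem (f := Prod.fst) ht
      have hp1 : p.1 ≠ k := fun he => hnd.1 (he ▸ hk)
      rw [if_neg (by simp [hp1])]
      simp only [List.sum_cons]
      rw [ih k c v hnd.2 ht]
      ring

theorem pvWS_insert (caps : List (List Int)) (n i : Nat)
    (d : PySem.Dict (List Int) Int) (hnd : d.keys.Nodup) (k : List Int) (v : Int) :
    pvWS caps n i (d.insert k (d.getD k 0 + v)).items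
      = pvWS caps n i d.items + v * pvA_go caps n (PySem.Set.ofList k) i 0 := by
  unfold pvWS
  by_cases hc : d.contains k
  · have hs : (d.get? k).isSome := by rw [← PySem.Dict.contains_eq_isSome_get?, hc]
    obtain ⟨c, hcv⟩ := Option.isSome_iff_exists.mp hs
    have hg : d.getD k 0 = c := by rw [PySem.Dict.getD_eq_get?_getD, hcv]; rfl
    have hmem : (k, c) ∈ d.items := PySem.Dict.mem_items_of_get?_eq_some d hcv
    rw [PySem.Dict.items_insert_of_contains d _ hc, hg]
    have hnd' : (d.items.map Prod.fst).Nodup := by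
      simpa only [PySem.Dict.keys] using hnd
    exact pvReplaceSum (fun kk => pvA_go caps n (PySem.Set.ofList kk) i 0) d.items k c v hnd' hmem
  · rw [PySem.Dict.items_insert_of_not_contains d _ (by simpa using hc),
        PySem.Dict.getD_of_not_contains d 0 (by simpa using hc)]
    simp only [List.map_append, List.sum_append, List.map_cons, List.map_nil, List.sum_cons,
      List.sum_nil]
    ring

theorem pvB_step_nodup (collection : List Int) (fut : PySem.Set Int)
    (nx : PySem.Dict (List Int) Int)
    (used : List Int) (count : Int) (h : nx.keys.Nodup) :
    (pvB_step collection fut nx used count).keys.Nodup := by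
  unfold pvB_step
  induction collection generalizing nx with
  | nil => exact h
  | cons cap l ihl =>
    simp only [List.foldl_cons]
    by_cases hc : PySem.Set.contains (PySem.Set.ofList used) cap
    · rw [if_pos hc]; exact ihl nx h
    · rw [if_neg hc]
      exact ihl _ (PySem.Dict.nodup_keys_insert nx _ _ h)

theorem pvB_step_ws (caps : List (List Int)) (n i : Nat) (hn : n = caps.length) (hi : i < n)
    (collection : List Int) (hcoll : collection = PySem.List.pyGetD caps (Int.ofNat i) [])
    (fut : PySem.Set Int) (hfut : ∀ x : Int, x ∈ fut ↔ x ∈ ((caps.drop (i+1)).flatten))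
    (nx : PySem.Dict (List Int) Int) (hnd : nx.keys.Nodup) (used : List Int) (count : Int) :
    pvWS caps n (i+1) (pvB_step collection fut nx used count).items
      = pvWS caps n (i+1) nx.items
        + count * pvA_go caps n (PySem.Set.ofList used) i 0 := by
  have key : ∀ (l : List Int) (nx : PySem.Dict (List Int) Int), nx.keys.Nodup →
      pvWS caps n (i+1) (pvB_step l fut nx used count).items
        = pvWS caps n (i+1) nx.items
          + count * l.foldl (fun a cap => if PySem.Set.contains (PySem.Set.ofList used) cap then a
              else pvA_go caps n (PySem.Set.add (PySem.Set.ofList used) cap) (i + 1) a) 0 := by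
    intro l
    induction l with
    | nil => intro nx hnd; simp [pvB_step]
    | cons cap l ihl =>
      intro nx hnd
      unfold pvB_step
      simp only [List.foldl_cons]
      by_cases hc : PySem.Set.contains (PySem.Set.ofList used) cap
      · rw [if_pos hc, if_pos hc]
        exact ihl nx hnd
      · rw [if_neg hc, if_neg hc]
        have hins := pvWS_insert caps n (i+1) nx hnd
          (PySem.List.sorted
            (PySem.Set.inter (PySem.Set.union (PySem.Set.ofList used) [cap]) fut)
            (fun x => x) false) count
        have hcg : pvA_go caps n
              (PySem.Set.ofList (PySem.List.sorted
                (PySem.Set.inter (PySem.Set.union (PySem.Set.ofList used) [cap]) fut)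
                (fun x => x) false)) (i+1) 0
            = pvA_go caps n (PySem.Set.add (PySem.Set.ofList used) cap) (i+1) 0 := by
          apply pvA_go_congr caps n hn n (i+1) _ _ 0 (by omega)
          intro x hx
          have hxf : x ∈ fut := (hfut x).mpr hx
          simp [PySem.Set.mem_ofList, PySem.List.mem_sorted, PySem.Set.mem_inter,
            PySem.Set.mem_union, PySem.Set.mem_add, hxf]
        have := ihl (nx.insert
            (PySem.List.sorted
              (PySem.Set.inter (PySem.Set.union (PySem.Set.ofList used) [cap]) fut)
              (fun x => x) false)
            (nx.getD (PySem.List.sorted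
              (PySem.Set.inter (PySem.Set.union (PySem.Set.ofList used) [cap]) fut)
              (fun x => x) false) 0 + count))
            (PySem.Dict.nodup_keys_insert nx _ _ hnd)
        unfold pvB_step at this
        rw [this, hins, hcg,
            pvFoldA_acc caps n i (PySem.Set.ofList used) l
              (pvA_go caps n (PySem.Set.add (PySem.Set.ofList used) cap) (i + 1) 0)]
        ring
  rw [key collection nx hnd]
  congr 1
  have hnge : ¬ i ≥ n := by omega
  rw [pvA_go]
  simp only [dif_neg hnge]
  rw [← hcoll]

theorem pvB_items_fold_nodup (collection : List Int) (fut : PySem.Set Int) :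
    ∀ (ps : List (List Int × Int)) (nx : PySem.Dict (List Int) Int), nx.keys.Nodup →
      (ps.foldl (fun nx p => pvB_step collection fut nx p.1 p.2) nx).keys.Nodup := by
  intro ps
  induction ps with
  | nil => intro nx h; exact h
  | cons p ps ih =>
    intro nx h
    simp only [List.foldl_cons]
    exact ih _ (pvB_step_nodup collection fut nx p.1 p.2 h)

theorem pvB_items_fold_ws (caps : List (List Int)) (n i : Nat) (hn : n = caps.length)
    (hi : i < n)
    (collection : List Int) (hcoll : collection = PySem.List.pyGetD caps (Int.ofNat i) [])
    (fut : PySem.Set Int) (hfut : ∀ x : Int, x ∈ fut ↔ x ∈ ((caps.drop (i+1)).flatten)) :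
    ∀ (ps : List (List Int × Int)) (nx : PySem.Dict (List Int) Int), nx.keys.Nodup →
      pvWS caps n (i+1) ((ps.foldl (fun nx p => pvB_step collection fut nx p.1 p.2) nx).items)
        = pvWS caps n (i+1) nx.items + pvWS caps n i ps := by
  intro ps
  induction ps with
  | nil => intro nx h; simp [pvWS]
  | cons p ps ih =>
    intro nx h
    simp only [List.foldl_cons]
    rw [ih _ (pvB_step_nodup collection fut nx p.1 p.2 h),
        pvB_step_ws caps n i hn hi collection hcoll fut hfut nx h p.1 p.2]
    unfold pvWS
    simp only [List.map_cons, List.sum_cons]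
    ring

theorem pvB_sfxAux_cons (c : List Int) (rest : List (List Int)) :
    pvB_sfxAux (c :: rest)
      = ((pvB_sfxAux rest).1 ++ [(pvB_sfxAux rest).2],
         PySem.Set.union (pvB_sfxAux rest).2 (PySem.Set.ofList c)) := by
  unfold pvB_sfxAux
  rw [List.reverse_cons, List.foldl_append]
  rfl

theorem pvB_mem_sfxAux_snd (caps : List (List Int)) (x : Int) :
    x ∈ (pvB_sfxAux caps).2 ↔ x ∈ caps.flatten := by
  induction caps with
  | nil => simp [pvB_sfxAux, PySem.Set.empty]
  | cons c rest ih =>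
    rw [pvB_sfxAux_cons]
    simp only [PySem.Set.mem_union, PySem.Set.mem_ofList, List.flatten_cons, List.mem_append,
      ih]
    tauto

theorem pvB_suffixes_cons (c : List Int) (rest : List (List Int)) :
    pvB_suffixes (c :: rest) = (pvB_sfxAux rest).2 :: pvB_suffixes rest := by
  unfold pvB_suffixes
  rw [pvB_sfxAux_cons]
  simp

theorem pvB_length_suffixes (caps : List (List Int)) :
    (pvB_suffixes caps).length = caps.length := by
  induction caps with
  | nil => rfl
  | cons c rest ih => rw [pvB_suffixes_cons]; simp [ih]

theorem pvB_suffixes_getElem :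
    ∀ (caps : List (List Int)) (j : Nat) (hj : j < (pvB_suffixes caps).length) (x : Int),
      x ∈ (pvB_suffixes caps)[j] ↔ x ∈ ((caps.drop (j+1)).flatten) := by
  intro caps
  induction caps with
  | nil => intro j hj; simp [pvB_suffixes, pvB_sfxAux] at hj
  | cons c rest ih =>
    intro j hj x
    have hj' : j < ((pvB_sfxAux rest).2 :: pvB_suffixes rest).length := by
      rw [← pvB_suffixes_cons]; exact hj
    rw [List.getElem_of_eq (pvB_suffixes_cons c rest) hj]
    cases j with
    | zero =>
      simp only [List.getElem_cons_zero, List.drop_succ_cons, List.drop_zero]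
      exact pvB_mem_sfxAux_snd rest x
    | succ j =>
      simp only [List.getElem_cons_succ, List.drop_succ_cons]
      exact ih j (by simpa using hj') x

theorem pvB_outer (caps : List (List Int)) :
    ∀ (rest : List (List Int × PySem.Set Int)) (i : Nat)
      (states : PySem.Dict (List Int) Int),
      rest.map Prod.fst = caps.drop i →
      (∀ (j : Nat) (hj : j < rest.length) (x : Int),
          x ∈ (rest[j]'hj).2 ↔ x ∈ ((caps.drop (i + j + 1)).flatten)) →
      states.keys.Nodup →
      (rest.foldl (fun states pair =>
          states.items.foldl (fun nx p => pvB_step pair.1 pair.2 nx p.1 p.2) PySem.Dict.empty)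
        states).values.sum = pvWS caps caps.length i states.items := by
  intro rest
  induction rest with
  | nil =>
    intro i states hfst hsnd hnd
    have hdrop : caps.drop i = [] := by simpa using hfst.symm
    have hge : i ≥ caps.length := by
      by_contra hlt
      have := List.drop_eq_nil_iff.mp hdrop
      omega
    simp only [List.foldl_nil]
    unfold pvWS
    have : ∀ p ∈ states.items,
        p.2 * pvA_go caps caps.length (PySem.Set.ofList p.1) i 0 = p.2 := by
      intro p _
      rw [pvA_go]
      simp [hge]
    rw [List.map_congr_left this]
    simp only [PySem.Dict.values]
  | cons pr rest ih =>
    intro i states hfst hsnd hnd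
    obtain ⟨coll, fut⟩ := pr
    have hi : i < caps.length := by
      by_contra hge
      rw [List.drop_eq_nil_iff.mpr (by omega)] at hfst
      simp at hfst
    have hdropc : caps.drop i = caps[i] :: caps.drop (i+1) :=
      List.drop_eq_getElem_cons hi
    rw [hdropc] at hfst
    simp only [List.map_cons] at hfst
    have hcollv : coll = caps[i] := by
      injection hfst
    have htail : rest.map Prod.fst = caps.drop (i+1) := by
      injection hfst
    have hcoll : coll = PySem.List.pyGetD caps (Int.ofNat i) [] := by
      rw [hcollv, Int.ofNat_eq_natCast, PySem.List.pyGetD_natCast,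
          List.getD_eq_getElem?_getD, List.getElem?_eq_getElem hi]
      rfl
    have hfut : ∀ x : Int, x ∈ fut ↔ x ∈ ((caps.drop (i+1)).flatten) := by
      intro x
      have := hsnd 0 (by simp) x
      simpa using this
    have hsnd' : ∀ (j : Nat) (hj : j < rest.length) (x : Int),
        x ∈ (rest[j]'hj).2 ↔ x ∈ ((caps.drop ((i+1) + j + 1)).flatten) := by
      intro j hj x
      have harith : i + 1 + j + 1 = i + (j + 1) + 1 := by omega
      rw [harith]
      have := hsnd (j+1) (by simp; omega) x
      simpa using this
    simp only [List.foldl_cons]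
    rw [ih (i+1) _ htail hsnd'
        (pvB_items_fold_nodup coll fut states.items PySem.Dict.empty
          PySem.Dict.nodup_keys_empty),
        pvB_items_fold_ws caps caps.length i rfl hi coll hcoll fut hfut states.items
          PySem.Dict.empty PySem.Dict.nodup_keys_empty]
    have hemp : (PySem.Dict.empty : PySem.Dict (List Int) Int).items = [] := rfl
    simp [pvWS, hemp]

-- ===== VERDICT (by name: the statement is the Claim_ definition above) =====
theorem get_total_arrangements_spec : Claim_equal_get_total_arrangements := by
  intro caps _
  unfold Spec_get_total_arrangements get_total_arrangements get_total_arrangements_alt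
  rw [pvB_outer caps (caps.zip (pvB_suffixes caps)) 0 (PySem.Dict.empty.insert [] 1)
      (by rw [List.map_fst_zip (by rw [pvB_length_suffixes])]
          simp)
      (by intro j hj x
          have hjl : j < caps.length := by
            have := hj
            simp only [List.length_zip, pvB_length_suffixes, Nat.min_self] at this
            exact this
          rw [List.getElem_zip]
          have := pvB_suffixes_getElem caps j (by rw [pvB_length_suffixes]; exact hjl) x
          simpa using this)
      (PySem.Dict.nodup_keys_insert _ _ _ PySem.Dict.nodup_keys_empty)]
  have hitems : ((PySem.Dict.empty : PySem.Dict (List Int) Int).insert [] 1).items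
      = [([], 1)] := rfl
  rw [hitems]
  simp [pvWS]
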